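-- pv_equiv track=rewrite | github.com/oyarsa/event_extraction | evaluation/src/evaluation/annotation/split_training.py | find_any_common_subsequence
-- ===== SOURCE A (Python) =====
-- def contains_subsequence(subseq: list[str], lst: list[str]) -> bool:
--     """Check if subseq is a contiguous subsequence of lst."""
--     if not subseq or not lst:
--         return False
--     return any(
--         subseq == lst[i : i + len(subseq)] for i in range(len(lst) - len(subseq) + 1)
--     )
--
-- def find_any_common_subsequence(
--     lst1: list[str], lst2: list[str], min_length: int
-- ) -> bool:
--     """Check if any contiguous subsequence of any length exists between lst1 and lst2."""
--     len1 = len(lst1)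
--     len2 = len(lst2)
--
--     for length in range(min_length, min(len1, len2) + 1):
--         for start in range(len1 - length + 1):
--             sub_seq = lst1[start : start + length]
--             if contains_subsequence(sub_seq, lst2):
--                 return True
--
--     return False
-- ===== SOURCE B (Python) =====
-- def find_any_common_subsequence(lst1, lst2, min_length):
--     """Check if any contiguous subsequence of any length exists between lst1 and lst2."""
--     # If a common contiguous run of length >= L exists, its prefix of length L is
--     # also common, so it suffices to probe windows of the single length L.
--     L = max(min_length, 1)
--     if L > min(len(lst1), len(lst2)):
--         return False
--     windows1 = {tuple(lst1[i : i + L]) for i in range(len(lst1) - L + 1)}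
--     return any(tuple(lst2[j : j + L]) in windows1 for j in range(len(lst2) - L + 1))
-- ===== Notes on version B (the rewrite author's own statement) =====
-- stated objective: faster
-- what changed: A scans every candidate length from min_length up to min(len1,len2) and for each length compares every window of lst1 against every window of lst2 (via contains_subsequence); B checks only the single length L = max(min_length, 1) by hashing all L-windows of lst1 into a set and probing lst2's L-windows, since any longer common run contains a common run of length L.
import Mathlib
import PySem

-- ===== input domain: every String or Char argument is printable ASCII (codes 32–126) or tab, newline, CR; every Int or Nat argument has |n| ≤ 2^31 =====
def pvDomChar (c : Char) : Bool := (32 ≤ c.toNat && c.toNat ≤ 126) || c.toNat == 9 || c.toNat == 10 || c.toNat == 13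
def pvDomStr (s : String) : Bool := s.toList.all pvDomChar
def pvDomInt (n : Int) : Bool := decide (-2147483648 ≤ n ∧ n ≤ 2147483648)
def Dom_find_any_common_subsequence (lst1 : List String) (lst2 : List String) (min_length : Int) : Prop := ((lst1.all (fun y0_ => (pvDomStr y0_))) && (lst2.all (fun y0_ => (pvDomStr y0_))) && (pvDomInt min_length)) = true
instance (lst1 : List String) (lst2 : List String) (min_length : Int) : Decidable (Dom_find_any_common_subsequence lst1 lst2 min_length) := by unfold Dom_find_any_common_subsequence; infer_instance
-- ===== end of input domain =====

-- B replaces A's nested scan over every length ≥ min_length by hashing all windows of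
-- the single length max(min_length, 1) of lst1 into a set and probing lst2's windows.

-- ===== PORT A =====
def contains_subsequence (subseq : List String) (lst : List String) : Bool :=
  if subseq.isEmpty || lst.isEmpty then false
  else
    (PySem.List.pyRange 0 ((lst.length : Int) - (subseq.length : Int) + 1)).any
      (fun i => subseq == PySem.List.slice lst (some i) (some (i + (subseq.length : Int))))

def find_any_common_subsequence (lst1 : List String) (lst2 : List String) (min_length : Int) : Bool :=
  let len1 : Int := lst1.length
  let len2 : Int := lst2.length
  (PySem.List.pyRange min_length (min len1 len2 + 1)).any (fun length =>
    (PySem.List.pyRange 0 (len1 - length + 1)).any (fun start =>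
      contains_subsequence (PySem.List.slice lst1 (some start) (some (start + length))) lst2))

-- ===== PORT B =====
def find_any_common_subsequence_alt (lst1 : List String) (lst2 : List String) (min_length : Int) : Bool :=
  let L : Int := max min_length 1
  if L > min (lst1.length : Int) (lst2.length : Int) then false
  else
    let windows1 : PySem.Set (List String) :=
      PySem.Set.ofList ((PySem.List.pyRange 0 ((lst1.length : Int) - L + 1)).map
        (fun i => PySem.List.slice lst1 (some i) (some (i + L))))
    (PySem.List.pyRange 0 ((lst2.length : Int) - L + 1)).any
      (fun j => PySem.Set.contains windows1 (PySem.List.slice lst2 (some j) (some (j + L))))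

-- ===== PRECONDITION & SPEC =====
def Spec_find_any_common_subsequence (lst1 : List String) (lst2 : List String) (min_length : Int) (out : Bool) : Prop := out = find_any_common_subsequence_alt lst1 lst2 min_length
instance (lst1 : List String) (lst2 : List String) (min_length : Int) (out : Bool) : Decidable (Spec_find_any_common_subsequence lst1 lst2 min_length out) := by unfold Spec_find_any_common_subsequence; infer_instance

-- ===== CLAIM (what is proved, stated in full; the proofs are below) =====
def Claim_equal_find_any_common_subsequence : Prop := ∀ (lst1 : List String) (lst2 : List String) (min_length : Int), Dom_find_any_common_subsequence lst1 lst2 min_length → Spec_find_any_common_subsequence lst1 lst2 min_length (find_any_common_subsequence lst1 lst2 min_length)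

-- ===== LEMMAS AND PROOFS =====

lemma pv_clampIdx_eq_min (n : Nat) (a : Int) (h : 0 ≤ a) :
    PySem.List.clampIdx n a = min a.toNat n := by
  simp only [PySem.List.clampIdx]
  split_ifs <;> omega

lemma pv_drop_min {α : Type} (xs : List α) (k : Nat) :
    xs.drop (min k xs.length) = xs.drop k := by
  rcases le_total k xs.length with h | h
  · rw [Nat.min_eq_left h]
  · rw [Nat.min_eq_right h, List.drop_eq_nil_of_le le_rfl, List.drop_eq_nil_of_le h]

lemma pv_slice_window {α : Type} (xs : List α) (a b : Int) (h : 0 ≤ a) :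
    ∃ t : Nat, PySem.List.slice xs (some a) (some b) = (xs.drop a.toNat).take t := by
  refine ⟨PySem.List.clampIdx xs.length b - PySem.List.clampIdx xs.length a, ?_⟩
  simp only [PySem.List.slice]
  rw [pv_clampIdx_eq_min xs.length a h, pv_drop_min]

-- "lst1 and lst2 share a common contiguous window of length L"
def pvCommon (lst1 lst2 : List String) (L : Nat) : Prop :=
  ∃ i j : Nat, i + L ≤ lst1.length ∧ j + L ≤ lst2.length ∧
    (lst1.drop i).take L = (lst2.drop j).take L

lemma pv_take_min {α : Type} (l : List α) (t : Nat) :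
    l.take t = l.take (min t l.length) := by
  rcases le_total t l.length with h | h
  · rw [Nat.min_eq_left h]
  · rw [Nat.min_eq_right h, List.take_of_length_le h, List.take_length]

lemma pv_contains_iff (subseq lst : List String) (L : Nat) (hL : 1 ≤ L)
    (hlen : subseq.length = L) :
    contains_subsequence subseq lst = true ↔
      ∃ j : Nat, j + L ≤ lst.length ∧ subseq = (lst.drop j).take L := by
  have hne : subseq.isEmpty = false := by
    rw [List.isEmpty_eq_false_iff]
    intro h; rw [h] at hlen; simp at hlen; omega
  by_cases hlst : lst = []
  · subst hlst
    simp only [contains_subsequence, hne, List.isEmpty_nil, Bool.or_true, if_true]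
    constructor
    · intro h; cases h
    · rintro ⟨j, hj, -⟩; simp at hj; omega
  · have hlst' : lst.isEmpty = false := by rw [List.isEmpty_eq_false_iff]; exact hlst
    simp only [contains_subsequence, hne, hlst', Bool.or_self, Bool.false_eq_true, if_false]
    rw [List.any_eq_true]
    constructor
    · rintro ⟨x, hx, hbeq⟩
      rw [PySem.List.mem_pyRange_one] at hx
      obtain ⟨hx0, hxlt⟩ := hx
      refine ⟨x.toNat, by omega, ?_⟩
      rw [beq_iff_eq] at hbeq
      rw [hbeq, hlen]
      conv_lhs => rw [← Int.toNat_of_nonneg hx0]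
      exact PySem.List.slice_natCast_add lst x.toNat L
    · rintro ⟨j, hj, heq⟩
      refine ⟨(j : Int), ?_, ?_⟩
      · rw [PySem.List.mem_pyRange_one]; omega
      · rw [beq_iff_eq, hlen, PySem.List.slice_natCast_add]; exact heq

lemma pv_A_iff (lst1 lst2 : List String) (k : Int) :
    find_any_common_subsequence lst1 lst2 k = true ↔
      ∃ L : Nat, 1 ≤ L ∧ k ≤ (L : Int) ∧
        (L : Int) ≤ min (lst1.length : Int) (lst2.length : Int) ∧ pvCommon lst1 lst2 L := by
  simp only [find_any_common_subsequence]
  rw [List.any_eq_true]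
  constructor
  · rintro ⟨length, hmem, hinner⟩
    rw [PySem.List.mem_pyRange_one] at hmem
    rw [List.any_eq_true] at hinner
    obtain ⟨start, hsmem, hcont⟩ := hinner
    rw [PySem.List.mem_pyRange_one] at hsmem
    obtain ⟨hs0, hslt⟩ := hsmem
    set subseq := PySem.List.slice lst1 (some start) (some (start + length)) with hsub
    have hne : subseq ≠ [] := by
      intro h
      rw [h] at hcont
      simp [contains_subsequence] at hcont
    have hL1 : 1 ≤ subseq.length := by
      rcases hx : subseq with _ | ⟨c, cs⟩
      · exact absurd hx hne
      · simp
    obtain ⟨j, hj, heqj⟩ := (pv_contains_iff subseq lst2 subseq.length hL1 rfl).mp hcont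
    rcases le_or_gt length 0 with hneg | hpos
    · -- negative or zero slice length: still a window of lst1 at start.toNat
      obtain ⟨t, ht⟩ := pv_slice_window lst1 start (start + length) hs0
      rw [← hsub] at ht
      have hlenL : subseq.length = min t (lst1.length - start.toNat) := by
        rw [ht, List.length_take, List.length_drop]
      refine ⟨subseq.length, hL1, by omega, by omega, start.toNat, j, by omega, hj, ?_⟩
      have hwin : (lst1.drop start.toNat).take subseq.length = subseq := by
        rw [hlenL,
          show min t (lst1.length - start.toNat) = min t (lst1.drop start.toNat).length from by
            rw [List.length_drop],
          ← pv_take_min, ← ht]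
      rw [hwin]; exact heqj
    · -- positive length: the slice is exactly the take-length window
      have hslice : subseq = (lst1.drop start.toNat).take length.toNat := by
        rw [hsub]
        conv_lhs => rw [← Int.toNat_of_nonneg hs0, ← Int.toNat_of_nonneg hpos.le]
        exact PySem.List.slice_natCast_add lst1 start.toNat length.toNat
      have hsl : start.toNat + length.toNat ≤ lst1.length := by omega
      have hlenL : subseq.length = length.toNat := by
        rw [hslice, List.length_take, List.length_drop]; omega
      refine ⟨subseq.length, hL1, by omega, by omega, start.toNat, j, by omega, hj, ?_⟩
      have hwin : (lst1.drop start.toNat).take subseq.length = subseq := by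
        rw [hlenL, ← hslice]
      rw [hwin]; exact heqj
  · rintro ⟨L, hL1, hkL, hLmin, i, j, hi, hj, heq⟩
    refine ⟨(L : Int), ?_, ?_⟩
    · rw [PySem.List.mem_pyRange_one]; omega
    · rw [List.any_eq_true]
      refine ⟨(i : Int), ?_, ?_⟩
      · rw [PySem.List.mem_pyRange_one]; omega
      · have hslice : PySem.List.slice lst1 (some (i : Int)) (some ((i : Int) + (L : Int))) =
            (lst1.drop i).take L := PySem.List.slice_natCast_add lst1 i L
        rw [hslice]
        have hwl : ((lst1.drop i).take L).length = L := by
          rw [List.length_take, List.length_drop]; omega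
        rw [pv_contains_iff _ lst2 L (by omega) hwl]
        exact ⟨j, hj, heq⟩

lemma pv_B_iff (lst1 lst2 : List String) (k : Int) :
    find_any_common_subsequence_alt lst1 lst2 k = true ↔
      max k 1 ≤ min (lst1.length : Int) (lst2.length : Int) ∧
        pvCommon lst1 lst2 (max k 1).toNat := by
  simp only [find_any_common_subsequence_alt]
  set L : Int := max k 1 with hLdef
  have hL1 : (1 : Int) ≤ L := le_max_right k 1
  have hcast : ((L.toNat : Int)) = L := Int.toNat_of_nonneg (by omega)
  split_ifs with hgt
  · constructor
    · intro h; cases h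
    · rintro ⟨hle, -⟩; omega
  · rw [not_lt] at hgt
    rw [List.any_eq_true]
    constructor
    · rintro ⟨x, hx, hc⟩
      rw [PySem.List.mem_pyRange_one] at hx
      rw [PySem.Set.contains_iff, PySem.Set.mem_ofList, List.mem_map] at hc
      obtain ⟨y, hy, heq⟩ := hc
      rw [PySem.List.mem_pyRange_one] at hy
      have h1 : PySem.List.slice lst1 (some y) (some (y + L)) =
          (lst1.drop y.toNat).take L.toNat := by
        conv_lhs => rw [← Int.toNat_of_nonneg hy.1, ← hcast]
        exact PySem.List.slice_natCast_add lst1 y.toNat L.toNat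
      have h2 : PySem.List.slice lst2 (some x) (some (x + L)) =
          (lst2.drop x.toNat).take L.toNat := by
        conv_lhs => rw [← Int.toNat_of_nonneg hx.1, ← hcast]
        exact PySem.List.slice_natCast_add lst2 x.toNat L.toNat
      rw [h1, h2] at heq
      exact ⟨hgt, y.toNat, x.toNat, by omega, by omega, heq⟩
    · rintro ⟨hle, i, j, hi, hj, heq⟩
      refine ⟨(j : Int), ?_, ?_⟩
      · rw [PySem.List.mem_pyRange_one]; omega
      · rw [PySem.Set.contains_iff, PySem.Set.mem_ofList, List.mem_map]
        refine ⟨(i : Int), ?_, ?_⟩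
        · rw [PySem.List.mem_pyRange_one]; omega
        · have h1 : PySem.List.slice lst1 (some (i : Int)) (some ((i : Int) + L)) =
              (lst1.drop i).take L.toNat := by
            conv_lhs => rw [← hcast]
            exact PySem.List.slice_natCast_add lst1 i L.toNat
          have h2 : PySem.List.slice lst2 (some (j : Int)) (some ((j : Int) + L)) =
              (lst2.drop j).take L.toNat := by
            conv_lhs => rw [← hcast]
            exact PySem.List.slice_natCast_add lst2 j L.toNat
          rw [h1, h2, heq]

lemma pv_common_mono (lst1 lst2 : List String) {L0 L : Nat} (h : L0 ≤ L)
    (hc : pvCommon lst1 lst2 L) : pvCommon lst1 lst2 L0 := by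
  obtain ⟨i, j, hi, hj, heq⟩ := hc
  refine ⟨i, j, by omega, by omega, ?_⟩
  have h1 : (lst1.drop i).take L0 = ((lst1.drop i).take L).take L0 := by
    rw [List.take_take, Nat.min_eq_left h]
  have h2 : (lst2.drop j).take L0 = ((lst2.drop j).take L).take L0 := by
    rw [List.take_take, Nat.min_eq_left h]
  rw [h1, h2, heq]

-- ===== VERDICT (by name: the statement is the Claim_ definition above) =====
theorem find_any_common_subsequence_spec : Claim_equal_find_any_common_subsequence := by
  intro lst1 lst2 k _
  unfold Spec_find_any_common_subsequence
  apply Bool.coe_iff_coe.mp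
  rw [pv_A_iff, pv_B_iff]
  constructor
  · rintro ⟨L, hL1, hkL, hLmin, hc⟩
    have hle : (max k 1).toNat ≤ L := by omega
    have : ((max k 1).toNat : Int) = max k 1 := Int.toNat_of_nonneg (by omega)
    exact ⟨by omega, pv_common_mono lst1 lst2 hle hc⟩
  · rintro ⟨hmin, hc⟩
    have h1 : (1 : Int) ≤ max k 1 := le_max_right k 1
    refine ⟨(max k 1).toNat, by omega, by omega, by omega, hc⟩
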